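-- pv_equiv track=rewrite | github.com/amir1986/web-video-editor-agent-platform | scripts/video_autopilot.py | _cells_to_segments
-- ===== SOURCE A (Python) =====
-- def _cells_to_segments(selected, grid_res, duration):
--     """Convert boolean grid to list of {"src_in", "src_out"} segments."""
--     segments = []
--     in_segment = False
--     seg_start = 0
--
--     for i in range(len(selected)):
--         if selected[i] and not in_segment:
--             seg_start = i * grid_res
--             in_segment = True
--         elif not selected[i] and in_segment:
--             seg_end = i * grid_res
--             segments.append({"src_in": seg_start, "src_out": min(seg_end, duration)})
--             in_segment = False
--
--     if in_segment:
--         segments.append({"src_in": seg_start, "src_out": duration})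
--
--     return segments
-- ===== SOURCE B (Python) =====
-- def _cells_to_segments(selected, grid_res, duration):
--     """Run-scanning version: two-pointer scan that jumps over whole runs.
--
--     Skip a run of False cells, then scan the following run of True cells as a
--     block [i, j); emit one segment per True run (src_out = duration when the
--     run reaches the end of the grid, else min(j*grid_res, duration))."""
--     n = len(selected)
--     segments = []
--     i = 0
--     while i < n:
--         if not selected[i]:
--             i += 1
--             continue
--         j = i
--         while j < n and selected[j]:
--             j += 1
--         src_out = duration if j == n else min(j * grid_res, duration)
--         segments.append({"src_in": i * grid_res, "src_out": src_out})
--         i = j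
--     return segments
-- ===== Notes on version B (the rewrite author's own statement) =====
-- stated objective: alternative
-- what changed: Replaces A's per-element edge-detecting state machine (live in_segment flag + pending seg_start, plus a post-loop flush) with a two-pointer run scanner: an outer pointer skips False cells, an inner scan finds the end j of each whole True run, and one segment is emitted per run with src_out chosen from whether the run reaches the end of the grid.
import Mathlib
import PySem

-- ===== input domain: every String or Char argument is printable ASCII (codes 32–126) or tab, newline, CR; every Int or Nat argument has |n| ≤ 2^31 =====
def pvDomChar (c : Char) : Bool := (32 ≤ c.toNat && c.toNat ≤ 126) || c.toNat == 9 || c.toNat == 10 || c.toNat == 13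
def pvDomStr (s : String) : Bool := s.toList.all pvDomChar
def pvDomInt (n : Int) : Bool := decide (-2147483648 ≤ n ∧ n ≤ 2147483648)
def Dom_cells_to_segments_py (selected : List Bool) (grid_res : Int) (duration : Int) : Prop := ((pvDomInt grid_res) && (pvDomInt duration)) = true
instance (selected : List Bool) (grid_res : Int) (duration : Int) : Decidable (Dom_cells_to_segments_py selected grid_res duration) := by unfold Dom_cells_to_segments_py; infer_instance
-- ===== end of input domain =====

-- B is a two-pointer run scanner instead of A's per-element flag state machine; same O(n) cost (objective: alternative).

-- ===== PORT A =====
-- A keeps a live in_segment flag and a pending seg_start, appending a finished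
-- segment dict the moment a run closes, and flushes an open run after the loop.
def pvSeg (s e : Int) : List (String × Int) := [("src_in", s), ("src_out", e)]

-- A's for-loop: state (segments, in_segment, seg_start), index i
def aLoop (grid_res duration : Int) : List Bool → Int → List (List (String × Int)) → Bool → Int → List (List (String × Int)) × Bool × Int
  | [], _, segs, ins, st => (segs, ins, st)
  | c :: xs, i, segs, ins, st =>
    if c && !ins then aLoop grid_res duration xs (i+1) segs true (i * grid_res)
    else if !c && ins then aLoop grid_res duration xs (i+1) (segs ++ [pvSeg st (min (i * grid_res) duration)]) false st
    else aLoop grid_res duration xs (i+1) segs ins st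

def cells_to_segments_py (selected : List Bool) (grid_res : Int) (duration : Int) : List (List (String × Int)) :=
  let r := aLoop grid_res duration selected 0 [] false 0
  if r.2.1 then r.1 ++ [pvSeg r.2.2 duration] else r.1

-- ===== PORT B =====
-- Source B's inner `while j < n and selected[j]` scan: length of the leading True run
def takeT : List Bool → Nat
  | true :: xs => takeT xs + 1
  | _ => 0

-- Source B's outer while loop: skip a False cell, or consume a whole True run
-- (jumping the pointer to j = i + 1 + takeT xs) and emit one segment for it.
def bRuns (g d : Int) : List Bool → Int → List (List (String × Int))
  | [], _ => []
  | false :: xs, i => bRuns g d xs (i+1)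
  | true :: xs, i =>
      pvSeg (i*g) (if xs.drop (takeT xs) = [] then d else min ((i+1+(takeT xs : Int))*g) d)
        :: bRuns g d (xs.drop (takeT xs)) (i+1+(takeT xs : Int))
termination_by xs _ => xs.length
decreasing_by
  all_goals simp [List.length_drop]

def cells_to_segments_py_alt (selected : List Bool) (grid_res : Int) (duration : Int) : List (List (String × Int)) :=
  bRuns grid_res duration selected 0

-- ===== PRECONDITION & SPEC =====
def Spec_cells_to_segments_py (selected : List Bool) (grid_res : Int) (duration : Int) (out : List (List (String × Int))) : Prop := out = cells_to_segments_py_alt selected grid_res duration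
instance (selected : List Bool) (grid_res : Int) (duration : Int) (out : List (List (String × Int))) : Decidable (Spec_cells_to_segments_py selected grid_res duration out) := by unfold Spec_cells_to_segments_py; infer_instance

-- ===== CLAIM (what is proved, stated in full; the proofs are below) =====
def Claim_equal_cells_to_segments_py : Prop := ∀ (selected : List Bool) (grid_res : Int) (duration : Int), Dom_cells_to_segments_py selected grid_res duration → Spec_cells_to_segments_py selected grid_res duration (cells_to_segments_py selected grid_res duration)

-- ===== LEMMAS AND PROOFS =====
-- unfolding equations for the well-founded bRuns
theorem bRuns_nil (g d : Int) (i : Int) : bRuns g d [] i = [] := by rw [bRuns]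
theorem bRuns_false (g d : Int) (xs : List Bool) (i : Int) :
    bRuns g d (false :: xs) i = bRuns g d xs (i+1) := by rw [bRuns]
theorem bRuns_true (g d : Int) (xs : List Bool) (i : Int) :
    bRuns g d (true :: xs) i
    = pvSeg (i*g) (if xs.drop (takeT xs) = [] then d else min ((i+1+(takeT xs : Int))*g) d)
        :: bRuns g d (xs.drop (takeT xs)) (i+1+(takeT xs : Int)) := by rw [bRuns]
-- recursive characterisation of A's result: the option is the open segment's start
def pvF (g d : Int) : List Bool → Int → Option Int → List (List (String × Int))
  | [], _, none => []
  | [], _, some st => [pvSeg st d]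
  | c :: xs, i, none => if c then pvF g d xs (i+1) (some (i*g)) else pvF g d xs (i+1) none
  | c :: xs, i, some st => if c then pvF g d xs (i+1) (some st) else pvSeg st (min (i*g) d) :: pvF g d xs (i+1) none

theorem aLoop_F (g d : Int) (xs : List Bool) : ∀ (i : Int) (segs : List (List (String × Int))) (ins : Bool) (st : Int),
    (let r := aLoop g d xs i segs ins st
     if r.2.1 then r.1 ++ [pvSeg r.2.2 d] else r.1)
    = segs ++ pvF g d xs i (if ins then some st else none) := by
  induction xs with
  | nil => intro i segs ins st; cases ins <;> simp [aLoop, pvF]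
  | cons c xs ih =>
    intro i segs ins st
    cases c <;> cases ins <;> simp [aLoop, pvF, ih]

-- open state of pvF: it runs to the end of the current True run and emits there
theorem pvF_open (g d : Int) (xs : List Bool) : ∀ (i st : Int),
    pvF g d xs i (some st)
    = pvSeg st (if xs.drop (takeT xs) = [] then d else min ((i+(takeT xs : Int))*g) d)
        :: pvF g d (xs.drop (takeT xs)) (i+(takeT xs : Int)) none := by
  induction xs with
  | nil => intro i st; simp [takeT, pvF]
  | cons c xs ih =>
    intro i st
    cases c
    · simp only [pvF, takeT, if_neg Bool.false_ne_true, List.drop_zero]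
      simp [pvF]
    · simp only [pvF, takeT, List.drop_succ_cons, ih (i+1) st]
      push_cast
      ring_nf

theorem pvF_closed (g d : Int) : ∀ (n : Nat) (xs : List Bool), xs.length ≤ n → ∀ (i : Int),
    pvF g d xs i none = bRuns g d xs i := by
  intro n
  induction n with
  | zero =>
    intro xs h i
    have : xs = [] := List.eq_nil_of_length_eq_zero (Nat.le_zero.mp h)
    subst this; simp [pvF, bRuns_nil]
  | succ n ih =>
    intro xs h i
    match xs with
    | [] => simp [pvF, bRuns_nil]
    | false :: xs =>
      simp only [List.length_cons, Nat.succ_le_succ_iff] at h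
      simp only [pvF, if_neg Bool.false_ne_true, bRuns_false]
      exact ih xs h (i+1)
    | true :: xs =>
      simp only [List.length_cons, Nat.succ_le_succ_iff] at h
      simp only [pvF, bRuns_true]
      rw [pvF_open]
      have hlen : (xs.drop (takeT xs)).length ≤ n := by
        simp [List.length_drop]; omega
      rw [ih _ hlen]
      push_cast
      ring_nf

-- ===== VERDICT (by name: the statement is the Claim_ definition above) =====
theorem cells_to_segments_py_spec : Claim_equal_cells_to_segments_py := by
  intro selected grid_res duration _
  unfold Spec_cells_to_segments_py cells_to_segments_py cells_to_segments_py_alt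
  have hA := aLoop_F grid_res duration selected 0 [] false 0
  simp only [Bool.false_eq_true, if_false, List.nil_append] at hA
  rw [hA]
  exact pvF_closed grid_res duration selected.length selected (le_refl _) 0
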